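-- pv_equiv track=rewrite | github.com/kurta17/problem-solving | algorithm and data structure 2/HW2/B. Sigma-Trimpasation.py | counting_sort_sum
-- ===== SOURCE A (Python) =====
-- quantum_a = 7**5
--
-- quantum_m = 2**31 - 1
--
-- def counting_sort_sum(n, m, q0):
--     m_div2 = m // 2
--     q = q0
--
--     # generating x data:
--     x = [0] * m
--     for i in range(n):
--         x[q % m] += 1
--         q = ((q * quantum_a) % quantum_m)
--
--     # calculating sum:
--     res = 0
--     i = 0
--     for j in range(m):
--         for z in range(x[j]):
--             res += (i + 1) * (j - m_div2)
--             i += 1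
--
--     return res
-- ===== SOURCE B (Python) =====
-- quantum_a = 7**5
--
-- quantum_m = 2**31 - 1
--
-- def counting_sort_sum(n, m, q0):
--     m_div2 = m // 2
--     q = q0
--
--     # generating x data (same as A):
--     x = [0] * m
--     for _ in range(n):
--         x[q % m] += 1
--         q = (q * quantum_a) % quantum_m
--
--     # closed-form rank-weighted sum per bucket instead of the nested per-element loop:
--     res = 0
--     i = 0
--     for j in range(m):
--         c = x[j]
--         res += (j - m_div2) * (c * i + c * (c + 1) // 2)
--         i += c
--     return res
-- ===== Notes on version B (the rewrite author's own statement) =====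
-- stated objective: simpler
-- what changed: The nested per-element summation loop is replaced by a single pass over buckets using the arithmetic-series closed form (j - m//2) * (c*i + c*(c+1)//2) with a running rank offset i.
import Mathlib
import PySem

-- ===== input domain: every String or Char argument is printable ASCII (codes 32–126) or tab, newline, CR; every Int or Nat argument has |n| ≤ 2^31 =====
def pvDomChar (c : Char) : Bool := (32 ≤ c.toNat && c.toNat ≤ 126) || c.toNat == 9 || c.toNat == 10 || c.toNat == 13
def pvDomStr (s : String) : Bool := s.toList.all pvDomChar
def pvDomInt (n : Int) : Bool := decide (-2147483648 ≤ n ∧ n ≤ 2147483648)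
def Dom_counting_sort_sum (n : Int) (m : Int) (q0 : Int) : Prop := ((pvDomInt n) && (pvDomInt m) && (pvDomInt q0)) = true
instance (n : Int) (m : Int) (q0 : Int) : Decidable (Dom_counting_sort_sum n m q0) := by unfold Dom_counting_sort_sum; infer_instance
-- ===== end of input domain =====

-- B replaces A's nested per-element summation with a per-bucket closed form (simpler single pass);
-- the LCG generation loop is identical in both Pythons and shared here as pvGen.

-- the generation loop 'for i in range(n): x[q % m] += 1; q = (q*16807) % 2147483647',
-- fuel = n.toNat (range(n) is empty for n ≤ 0, matching toNat = 0).
-- Inside Pre_ (0 < m when the loop runs) q % m lies in [0, m), so the .toNat index is exact.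
def pvGen (m : Int) : Nat → List Int → Int → List Int × Int
  | 0, x, q => (x, q)
  | k+1, x, q =>
      pvGen m k (x.set ((PySem.Int.mod q m).toNat) (x.getD ((PySem.Int.mod q m).toNat) 0 + 1))
        (PySem.Int.mod (q * 16807) 2147483647)

-- ===== PORT A =====
-- inner loop 'for z in range(x[j]): res += (i+1)*(j-m_div2); i += 1', state (res, i)
def pvInnerA (d : Int) : Nat → Int × Int → Int × Int
  | 0, s => s
  | z+1, s => pvInnerA d z (s.1 + (s.2 + 1) * d, s.2 + 1)

def counting_sort_sum (n : Int) (m : Int) (q0 : Int) : Int :=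
  let m_div2 := PySem.Int.floordiv m 2
  let x := (pvGen m n.toNat (List.replicate m.toNat 0) q0).1
  -- 'for j in range(m)': indices 0..m-1 (empty if m ≤ 0); x has length m so getD's default is never used
  let s := (List.range m.toNat).foldl
    (fun (s : Int × Int) (j : Nat) => pvInnerA ((j : Int) - m_div2) (x.getD j 0).toNat s) (0, 0)
  s.1

-- ===== PORT B =====
def counting_sort_sum_alt (n : Int) (m : Int) (q0 : Int) : Int :=
  let m_div2 := PySem.Int.floordiv m 2
  let x := (pvGen m n.toNat (List.replicate m.toNat 0) q0).1
  let s := (List.range m.toNat).foldl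
    (fun (s : Int × Int) (j : Nat) =>
      let c := x.getD j 0
      (s.1 + ((j : Int) - m_div2) * (c * s.2 + PySem.Int.floordiv (c * (c + 1)) 2),
       s.2 + c)) (0, 0)
  s.1

-- ===== PRECONDITION & SPEC =====
-- A raises (ZeroDivisionError for m = 0, IndexError for m < 0) whenever n > 0 and m ≤ 0; those
-- inputs are excluded. Every input on which A returns normally satisfies Pre_.
def Pre_counting_sort_sum (n : Int) (m : Int) (q0 : Int) : Prop := n ≤ 0 ∨ 0 < m
instance (n : Int) (m : Int) (q0 : Int) : Decidable (Pre_counting_sort_sum n m q0) := by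
  unfold Pre_counting_sort_sum; infer_instance

def pvWitness_counting_sort_sum : Int × Int × Int := (6, 4, 3)

def Spec_counting_sort_sum (n : Int) (m : Int) (q0 : Int) (out : Int) : Prop := out = counting_sort_sum_alt n m q0
instance (n : Int) (m : Int) (q0 : Int) (out : Int) : Decidable (Spec_counting_sort_sum n m q0 out) := by unfold Spec_counting_sort_sum; infer_instance

-- ===== CLAIM (what is proved, stated in full; the proofs are below) =====
def Claim_equal_counting_sort_sum : Prop := ∀ (n : Int) (m : Int) (q0 : Int), Dom_counting_sort_sum n m q0 → Pre_counting_sort_sum n m q0 → Spec_counting_sort_sum n m q0 (counting_sort_sum n m q0)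

-- ===== LEMMAS AND PROOFS =====

-- triangular numbers, the exact value of c*(c+1)//2
def pvTri : Nat → Int
  | 0 => 0
  | c+1 => pvTri c + (c + 1)

theorem pvTri_double : ∀ c : Nat, 2 * pvTri c = (c : Int) * ((c : Int) + 1) := by
  intro c
  induction c with
  | zero => simp [pvTri]
  | succ c ih => simp [pvTri]; push_cast at ih ⊢; ring_nf at ih ⊢; omega

theorem pvTri_floordiv (c : Nat) :
    PySem.Int.floordiv ((c : Int) * ((c : Int) + 1)) 2 = pvTri c := by
  rw [← pvTri_double c, PySem.Int.floordiv_eq_ediv_of_pos (by omega)]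
  omega

theorem pvInnerA_eq (d : Int) : ∀ (c : Nat) (res i : Int),
    pvInnerA d c (res, i) = (res + d * ((c : Int) * i + pvTri c), i + c) := by
  intro c
  induction c with
  | zero => intro res i; simp [pvInnerA, pvTri]
  | succ c ih =>
      intro res i
      show pvInnerA d c (res + (i + 1) * d, i + 1) = _
      rw [ih]
      refine Prod.ext ?_ ?_ <;> simp [pvTri] <;> push_cast <;> ring

theorem pvInnerA_int (d c res i : Int) (hc : 0 ≤ c) :
    pvInnerA d c.toNat (res, i)
      = (res + d * (c * i + PySem.Int.floordiv (c * (c + 1)) 2), i + c) := by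
  have h : (c.toNat : Int) = c := Int.toNat_of_nonneg hc
  rw [pvInnerA_eq, ← pvTri_floordiv, h]

theorem getD_nonneg (x : List Int) (h : ∀ v ∈ x, 0 ≤ v) (j : Nat) : 0 ≤ x.getD j 0 := by
  by_cases hj : j < x.length
  · rw [List.getD_eq_getElem x 0 hj]
    exact h _ (List.getElem_mem hj)
  · rw [List.getD_eq_default x 0 (by omega)]

theorem mem_set_nonneg (x : List Int) (i : Nat) (h : ∀ v ∈ x, 0 ≤ v) :
    ∀ v ∈ x.set i (x.getD i 0 + 1), 0 ≤ v := by
  intro v hv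
  rcases List.mem_or_eq_of_mem_set hv with hv | hv
  · exact h v hv
  · have := getD_nonneg x h i; omega

theorem pvGen_nonneg (m : Int) : ∀ (k : Nat) (x : List Int) (q : Int),
    (∀ v ∈ x, 0 ≤ v) → ∀ v ∈ (pvGen m k x q).1, 0 ≤ v := by
  intro k
  induction k with
  | zero => intro x q h; simpa [pvGen] using h
  | succ k ih =>
      intro x q h
      exact ih _ _ (mem_set_nonneg x _ h)

theorem fold_eq (md : Int) (x : List Int) (hx : ∀ v ∈ x, 0 ≤ v) :
    ∀ (js : List Nat) (s : Int × Int),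
      js.foldl (fun (s : Int × Int) (j : Nat) => pvInnerA ((j : Int) - md) (x.getD j 0).toNat s) s
      = js.foldl (fun (s : Int × Int) j =>
          let c := x.getD j 0
          (s.1 + ((j : Int) - md) * (c * s.2 + PySem.Int.floordiv (c * (c + 1)) 2),
           s.2 + c)) s := by
  intro js
  induction js with
  | nil => intro s; rfl
  | cons j js ih =>
      intro s
      simp only [List.foldl_cons]
      rw [show s = (s.1, s.2) from rfl, pvInnerA_int _ _ _ _ (getD_nonneg x hx j), ih]

-- ===== VERDICT (by name: the statement is the Claim_ definition above) =====
theorem counting_sort_sum_spec : Claim_equal_counting_sort_sum := by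
  intro n m q0 _hd _hp
  unfold Spec_counting_sort_sum counting_sort_sum counting_sort_sum_alt
  have hx : ∀ v ∈ (pvGen m n.toNat (List.replicate m.toNat 0) q0).1, 0 ≤ v :=
    pvGen_nonneg m n.toNat _ q0 (by intro v hv; simp at hv; omega)
  exact congrArg Prod.fst (fold_eq (PySem.Int.floordiv m 2) _ hx (List.range m.toNat) (0, 0))
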